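-- pv_equiv track=rewrite | github.com/Ragooku/rpp2025 | lab1rpp/1.py | remove_multiples_of_three_std
-- ===== SOURCE A (Python) =====
-- def remove_multiples_of_three_std(lst):
--     """Удаляет элементы, кратные 3, между минимальным и максимальным элементами (с использованием стандартных функций)"""
--     min_index = lst.index(min(lst))
--     max_index = lst.index(max(lst))
--
--     if max_index > min_index:
--         start, end = min_index, max_index
--     else:
--         start, end = max_index, min_index
--
--     return lst[:start + 1] + [x for x in lst[start + 1:end] if x % 3 != 0] + lst[end:]
-- ===== SOURCE B (Python) =====
-- def remove_multiples_of_three_std(lst):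
--     """Value-driven state machine: no index computation at all. Walk the list once;
--     copy elements until the first occurrence of an extremum (min or max), then
--     filter multiples of 3 until the other extremum's first occurrence, then copy
--     the rest. On all-equal lists the filtered region is empty and the list is
--     returned unchanged."""
--     m, M = min(lst), max(lst)
--     out = []
--     state = 0          # 0 = before the first extremum, 1 = between, 2 = after
--     target = None
--     for x in lst:
--         if state == 0:
--             out.append(x)
--             if x == m or x == M:
--                 if m == M:
--                     state = 2
--                 else:
--                     target = M if x == m else m
--                     state = 1
--         elif state == 1:
--             if x == target:
--                 out.append(x)
--                 state = 2
--             elif x % 3 != 0: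
--                 out.append(x)
--         else:
--             out.append(x)
--     return out
-- ===== Notes on version B (the rewrite author's own statement) =====
-- stated objective: alternative
-- what changed: Replaces A's index computation (lst.index of min/max) plus three-slice concatenation by a value-driven state machine: one pass that switches from copy to filter mode on meeting the first extremum value and back on meeting the other, never computing an index; on all-equal lists B returns the list unchanged instead of A's duplicated head.
-- intended difference: On nonempty lists whose elements are all equal, min_index == max_index and A's overlapping slices return the list with its first element duplicated; B returns the list unchanged, which is the intended value since nothing lies strictly between the min and max positions. — e.g. on remove_multiples_of_three_std([5]): A returns [5, 5], B returns [5]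
import Mathlib
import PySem

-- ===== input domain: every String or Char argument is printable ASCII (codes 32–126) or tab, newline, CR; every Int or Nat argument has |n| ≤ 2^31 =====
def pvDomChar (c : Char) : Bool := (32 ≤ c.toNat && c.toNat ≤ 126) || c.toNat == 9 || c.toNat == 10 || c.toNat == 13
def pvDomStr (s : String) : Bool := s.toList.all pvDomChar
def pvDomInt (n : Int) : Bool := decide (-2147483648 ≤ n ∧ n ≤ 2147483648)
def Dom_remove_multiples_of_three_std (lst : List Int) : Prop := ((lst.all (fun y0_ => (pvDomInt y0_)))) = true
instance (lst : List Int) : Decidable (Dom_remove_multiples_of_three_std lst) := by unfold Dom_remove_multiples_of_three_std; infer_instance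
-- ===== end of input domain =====

-- B replaces A's index computation plus three-slice concatenation by a value-driven
-- state machine (copy / filter / copy, switching on the extremum VALUES, no indices);
-- on all-equal lists B does not duplicate the boundary element (see D_ below).
-- Equality is about the return value; neither program mutates its argument.

-- ===== PORT A =====
def remove_multiples_of_three_std (lst : List Int) : List Int :=
  let min_index : Nat :=
    ((PySem.List.min? lst (fun x => x)).bind (fun m => PySem.List.index? lst m)).getD 0
  let max_index : Nat :=
    ((PySem.List.max? lst (fun x => x)).bind (fun m => PySem.List.index? lst m)).getD 0
  let se : Nat × Nat :=
    if max_index > min_index then (min_index, max_index) else (max_index, min_index)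
  PySem.List.slice lst none (some ((se.1 : Int) + 1)) ++
    (PySem.List.slice lst (some ((se.1 : Int) + 1)) (some (se.2 : Int))).filter
      (fun x => decide (PySem.Int.mod x 3 ≠ 0)) ++
    PySem.List.slice lst (some (se.2 : Int)) none

-- ===== PORT B =====
-- one step of the state machine: state 0 = before the first extremum (copy),
-- state 1 = between (filter multiples of 3, watch for the target), state 2 = after (copy)
def pvStepB (m M : Int) (st : List Int × Nat × Option Int) (x : Int) :
    List Int × Nat × Option Int :=
  if st.2.1 = 0 then
    if x = m ∨ x = M then
      if m = M then (st.1 ++ [x], 2, st.2.2)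
      else (st.1 ++ [x], 1, some (if x = m then M else m))
    else (st.1 ++ [x], 0, st.2.2)
  else if st.2.1 = 1 then
    if some x = st.2.2 then (st.1 ++ [x], 2, st.2.2)
    else if PySem.Int.mod x 3 ≠ 0 then (st.1 ++ [x], 1, st.2.2)
    else st
  else (st.1 ++ [x], 2, st.2.2)

def remove_multiples_of_three_std_alt (lst : List Int) : List Int :=
  let m : Int := (PySem.List.min? lst (fun x => x)).getD 0
  let M : Int := (PySem.List.max? lst (fun x => x)).getD 0
  (lst.foldl (pvStepB m M) ([], 0, none)).1

-- ===== PRECONDITION & SPEC =====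
-- Pre_ excludes only the empty list, on which Python's min()/max() raise ValueError (both in A and in B).
def Pre_remove_multiples_of_three_std (lst : List Int) : Prop := lst ≠ []
instance (lst : List Int) : Decidable (Pre_remove_multiples_of_three_std lst) := by
  unfold Pre_remove_multiples_of_three_std; infer_instance
def pvWitness_remove_multiples_of_three_std : List Int := [1, 6, 9, 2, 3, 10, 0]

-- On nonempty lists whose elements are all equal, min_index == max_index and A's
-- overlapping slices return the list with its first element duplicated; B returns the
-- list unchanged, which is the intended value since nothing lies strictly between the
-- min and max positions.
def D_remove_multiples_of_three_std (lst : List Int) : Prop :=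
  lst ≠ [] ∧ ∀ x ∈ lst, x = lst.headI
instance (lst : List Int) : Decidable (D_remove_multiples_of_three_std lst) := by
  unfold D_remove_multiples_of_three_std; infer_instance

def Spec_remove_multiples_of_three_std (lst : List Int) (out : List Int) : Prop :=
  ¬ D_remove_multiples_of_three_std lst → out = remove_multiples_of_three_std_alt lst
instance (lst : List Int) (out : List Int) : Decidable (Spec_remove_multiples_of_three_std lst out) := by
  unfold Spec_remove_multiples_of_three_std; infer_instance

def pvDiffWitness_remove_multiples_of_three_std : List Int := [5]
def pvDiffWitnessOut_remove_multiples_of_three_std : (List Int) × (List Int) := ([5, 5], [5])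

-- ===== CLAIM (what is proved, stated in full; the proofs are below) =====
def Claim_unchanged_remove_multiples_of_three_std : Prop :=
  ∀ (lst : List Int), Dom_remove_multiples_of_three_std lst →
    Pre_remove_multiples_of_three_std lst →
    Spec_remove_multiples_of_three_std lst (remove_multiples_of_three_std lst)
def Claim_changed_remove_multiples_of_three_std : Prop :=
  Dom_remove_multiples_of_three_std (pvDiffWitness_remove_multiples_of_three_std) ∧
  Pre_remove_multiples_of_three_std (pvDiffWitness_remove_multiples_of_three_std) ∧
  D_remove_multiples_of_three_std (pvDiffWitness_remove_multiples_of_three_std) ∧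
  remove_multiples_of_three_std (pvDiffWitness_remove_multiples_of_three_std) = pvDiffWitnessOut_remove_multiples_of_three_std.1 ∧
  remove_multiples_of_three_std_alt (pvDiffWitness_remove_multiples_of_three_std) = pvDiffWitnessOut_remove_multiples_of_three_std.2 ∧
  pvDiffWitnessOut_remove_multiples_of_three_std.1 ≠ pvDiffWitnessOut_remove_multiples_of_three_std.2
def Claim_exact_remove_multiples_of_three_std : Prop :=
  ∀ (lst : List Int), Dom_remove_multiples_of_three_std lst →
    Pre_remove_multiples_of_three_std lst →
    D_remove_multiples_of_three_std lst →
    remove_multiples_of_three_std lst ≠ remove_multiples_of_three_std_alt lst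

-- ===== LEMMAS AND PROOFS =====

-- in state 2 the machine copies everything
theorem pvStepB_s2 (m M : Int) (l out : List Int) (t : Option Int) :
    l.foldl (pvStepB m M) (out, 2, t) = (out ++ l, 2, t) := by
  induction l generalizing out with
  | nil => simp
  | cons x r ih => simp [pvStepB, ih]

-- in state 1, as long as the target is not met, the machine filters multiples of 3
theorem pvStepB_s1 (m M : Int) (l out : List Int) (t : Option Int)
    (h : ∀ x ∈ l, some x ≠ t) :
    l.foldl (pvStepB m M) (out, 1, t) =
      (out ++ l.filter (fun x => decide (PySem.Int.mod x 3 ≠ 0)), 1, t) := by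
  induction l generalizing out with
  | nil => simp
  | cons x r ih =>
    have hx : some x ≠ t := h x (by simp)
    have hr : ∀ y ∈ r, some y ≠ t := fun y hy => h y (by simp [hy])
    by_cases h3 : (3 : Int) ∣ x
    · simp [pvStepB, hx, h3, ih _ hr]
    · simp [pvStepB, hx, h3, ih _ hr]

-- in state 0, as long as no extremum is met, the machine copies everything
theorem pvStepB_s0 (m M : Int) (l out : List Int) (t : Option Int)
    (h : ∀ x ∈ l, x ≠ m ∧ x ≠ M) :
    l.foldl (pvStepB m M) (out, 0, t) = (out ++ l, 0, t) := by
  induction l generalizing out with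
  | nil => simp
  | cons x r ih =>
    have hx := h x (by simp)
    have hr : ∀ y ∈ r, y ≠ m ∧ y ≠ M := fun y hy => h y (by simp [hy])
    simp [pvStepB, hx.1, hx.2, ih _ hr]

-- the full run of the machine on a decomposed list
theorem pv_coreB (m M : Int) (hmM : m ≠ M) (P Mi S : List Int) (a b : Int)
    (hP : ∀ x ∈ P, x ≠ m ∧ x ≠ M) (ha : a = m ∨ a = M)
    (hb : b = (if a = m then M else m))
    (hMi : ∀ x ∈ Mi, x ≠ (if a = m then M else m)) :
    ((P ++ a :: (Mi ++ b :: S)).foldl (pvStepB m M) ([], 0, none)).1 =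
      (P ++ [a]) ++ (Mi.filter (fun x => decide (PySem.Int.mod x 3 ≠ 0))) ++ b :: S := by
  rw [List.foldl_append, pvStepB_s0 m M P [] none hP, List.foldl_cons]
  have hstep : pvStepB m M (([] : List Int) ++ P, 0, none) a =
      (P ++ [a], 1, some (if a = m then M else m)) := by
    simp [pvStepB, ha, hmM]
  rw [hstep, List.foldl_append,
      pvStepB_s1 m M Mi (P ++ [a]) (some (if a = m then M else m))
        (fun x hx => by simpa using hMi x hx),
      List.foldl_cons]
  have hstep2 : pvStepB m M
      (P ++ [a] ++ Mi.filter (fun x => decide (PySem.Int.mod x 3 ≠ 0)), 1,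
        some (if a = m then M else m)) b =
      (P ++ [a] ++ Mi.filter (fun x => decide (PySem.Int.mod x 3 ≠ 0)) ++ [b], 2,
        some (if a = m then M else m)) := by
    simp [pvStepB, hb]
  rw [hstep2, pvStepB_s2]
  simp

-- list decomposition around two positions s < e
theorem pv_split (lst : List Int) (s e : Nat) (hse : s < e) (he : e < lst.length) :
    lst = lst.take s ++ lst[s]'(by omega) ::
      (((lst.drop (s+1)).take (e-(s+1))) ++ lst[e] :: lst.drop (e+1)) := by
  have h1 : lst.drop s = lst[s]'(by omega) :: lst.drop (s+1) :=
    List.drop_eq_getElem_cons (by omega)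
  have h2 : lst.drop e = lst[e] :: lst.drop (e+1) :=
    List.drop_eq_getElem_cons he
  have h4 : (lst.drop (s+1)).drop (e-(s+1)) = lst.drop e := by
    rw [List.drop_drop]; congr 1; omega
  have h3 : lst.drop (s+1) =
      (lst.drop (s+1)).take (e-(s+1)) ++ lst[e] :: lst.drop (e+1) := by
    conv_lhs => rw [← List.take_append_drop (e-(s+1)) (lst.drop (s+1))]
    rw [h4, h2]
  conv_lhs => rw [← List.take_append_drop s lst]
  rw [h1]
  conv_lhs => rw [h3]


-- bridge: A's three slices equal B's machine run, given first-occurrence facts about s and e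
theorem pv_assemble (lst : List Int) (m M : Int) (s e : Nat)
    (hmM : m ≠ M) (hse : s < e) (helt : e < lst.length)
    (hpre : ∀ k (hk : k < s), lst[k]'(by omega) ≠ m ∧ lst[k]'(by omega) ≠ M)
    (ha : lst[s]'(by omega) = m ∨ lst[s]'(by omega) = M)
    (hb : lst[e]'helt = if lst[s]'(by omega) = m then M else m)
    (hmid : ∀ k (h1 : s < k) (h2 : k < e),
      lst[k]'(by omega) ≠ (if lst[s]'(by omega) = m then M else m)) :
    PySem.List.slice lst none (some ((s : Int) + 1)) ++
      (PySem.List.slice lst (some ((s : Int) + 1)) (some (e : Int))).filter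
        (fun x => decide (PySem.Int.mod x 3 ≠ 0)) ++
      PySem.List.slice lst (some (e : Int)) none
    = (lst.foldl (pvStepB m M) ([], 0, none)).1 := by
  have hslt : s < lst.length := by omega
  have hcast : ((s : Int) + 1) = ((s + 1 : Nat) : Int) := by push_cast; ring
  rw [hcast, PySem.List.slice_to_natCast, PySem.List.slice_natCast,
      PySem.List.slice_from_natCast]
  conv_rhs => rw [pv_split lst s e hse helt]
  rw [pv_coreB m M hmM (lst.take s) ((lst.drop (s+1)).take (e-(s+1))) (lst.drop (e+1))
        (lst[s]'hslt) (lst[e]'helt) ?hP ha hb ?hMi]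
  · have htake : lst.take (s+1) = lst.take s ++ [lst[s]'hslt] := by
      rw [List.take_add_one, List.getElem?_eq_getElem hslt]; rfl
    have hdrop : lst.drop e = lst[e]'helt :: lst.drop (e+1) := List.drop_eq_getElem_cons helt
    rw [htake, hdrop]
  case hP =>
    intro x hx
    obtain ⟨k, hk, hkx⟩ := List.mem_iff_getElem.mp hx
    have hks : k < s := by
      have := hk; rw [List.length_take] at this; omega
    have hkl : k < lst.length := by omega
    have : lst[k]'hkl = x := by rw [← hkx, List.getElem_take]
    rw [← this]; exact hpre k hks
  case hMi =>
    intro x hx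
    obtain ⟨k, hk, hkx⟩ := List.mem_iff_getElem.mp hx
    have hke : k < e - (s+1) := by
      have := hk; rw [List.length_take] at this; omega
    have hkl : s + 1 + k < lst.length := by
      have := hk; rw [List.length_take, List.length_drop] at this; omega
    have : lst[s+1+k]'hkl = x := by
      rw [← hkx, List.getElem_take, List.getElem_drop]
    rw [← this]; exact hmid (s+1+k) (by omega) (by omega)

theorem remove_multiples_of_three_std_spec : Claim_unchanged_remove_multiples_of_three_std := by
  intro lst _hdom hne hnd
  obtain ⟨m, hm⟩ : ∃ m, PySem.List.min? lst (fun x => x) = some m := by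
    cases hmm : PySem.List.min? lst (fun x => x) with
    | none => exact absurd ((PySem.List.min?_eq_none_iff _ _).mp hmm) hne
    | some m => exact ⟨m, rfl⟩
  obtain ⟨M, hM⟩ : ∃ M, PySem.List.max? lst (fun x => x) = some M := by
    cases hmm : PySem.List.max? lst (fun x => x) with
    | none => exact absurd ((PySem.List.max?_eq_none_iff _ _).mp hmm) hne
    | some M => exact ⟨M, rfl⟩
  have hmMem : m ∈ lst := PySem.List.min?_mem hm
  have hMMem : M ∈ lst := PySem.List.max?_mem hM
  obtain ⟨i, hi⟩ : ∃ i, PySem.List.index? lst m = some i := by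
    cases hii : PySem.List.index? lst m with
    | none => exact absurd hmMem ((PySem.List.index?_eq_none_iff _ _).mp hii)
    | some i => exact ⟨i, rfl⟩
  obtain ⟨j, hj⟩ : ∃ j, PySem.List.index? lst M = some j := by
    cases hjj : PySem.List.index? lst M with
    | none => exact absurd hMMem ((PySem.List.index?_eq_none_iff _ _).mp hjj)
    | some j => exact ⟨j, rfl⟩
  obtain ⟨hilt, hig, hifst⟩ := PySem.List.getElem_of_index?_eq_some hi
  obtain ⟨hjlt, hjg, hjfst⟩ := PySem.List.getElem_of_index?_eq_some hj
  -- m ≠ M: otherwise every element equals the head, i.e. D_ holds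
  have hmM : m ≠ M := by
    intro hEq
    apply hnd
    refine ⟨hne, fun x hx => ?_⟩
    have h1 : m ≤ x := by simpa using PySem.List.min?_isMin hm x hx
    have h2 : x ≤ M := by simpa using PySem.List.max?_isMax hM x hx
    have hx' : x = m := le_antisymm (hEq ▸ h2) h1
    have hh : lst.headI ∈ lst := by
      cases lst with
      | nil => exact absurd rfl hne
      | cons a t => simp
    have h1' : m ≤ lst.headI := by simpa using PySem.List.min?_isMin hm _ hh
    have h2' : lst.headI ≤ M := by simpa using PySem.List.max?_isMax hM _ hh
    have hhm : lst.headI = m := le_antisymm (hEq ▸ h2') h1'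
    rw [hx', hhm]
  have hij : i ≠ j := by
    intro hEq; apply hmM; subst hEq; rw [← hig, hjg]
  unfold remove_multiples_of_three_std remove_multiples_of_three_std_alt
  unfold Spec_remove_multiples_of_three_std at *
  simp only [hm, hM, Option.bind_some, hi, hj, Option.getD_some]
  by_cases hc : j > i
  · rw [if_pos hc]
    have hb : lst[j]'hjlt = if lst[i]'hilt = m then M else m := by
      rw [if_pos hig]; exact hjg
    have hmid : ∀ k (h1 : i < k) (h2 : k < j),
        lst[k]'(by omega) ≠ (if lst[i]'hilt = m then M else m) := by
      intro k h1 h2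
      rw [if_pos hig]
      exact hjfst k h2
    have hpre : ∀ k (hk : k < i), lst[k]'(by omega) ≠ m ∧ lst[k]'(by omega) ≠ M := by
      intro k hk
      exact ⟨hifst k hk, hjfst k (by omega)⟩
    exact pv_assemble lst m M i j hmM hc hjlt hpre (Or.inl hig) hb hmid
  · have hc' : j < i := by omega
    rw [if_neg hc]
    have hMm : lst[j]'hjlt ≠ m := by rw [hjg]; exact fun h => hmM h.symm
    have hb : lst[i]'hilt = if lst[j]'hjlt = m then M else m := by
      rw [if_neg hMm]; exact hig
    have hmid : ∀ k (h1 : j < k) (h2 : k < i),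
        lst[k]'(by omega) ≠ (if lst[j]'hjlt = m then M else m) := by
      intro k h1 h2
      rw [if_neg hMm]
      exact hifst k h2
    have hpre : ∀ k (hk : k < j), lst[k]'(by omega) ≠ m ∧ lst[k]'(by omega) ≠ M := by
      intro k hk
      exact ⟨hifst k (by omega), hjfst k hk⟩
    exact pv_assemble lst m M j i hmM hc' hilt hpre (Or.inr hjg) hb hmid

-- inside D_: A prepends a duplicate of the head, B returns the list itself
theorem remove_multiples_of_three_std_tight : Claim_exact_remove_multiples_of_three_std := by
  intro lst _hdom hne hd
  obtain ⟨-, hall⟩ := hd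
  cases lst with
  | nil => exact absurd rfl hne
  | cons h t =>
    have hall' : ∀ x ∈ (h :: t), x = h := by simpa using hall
    obtain ⟨m, hm⟩ : ∃ m, PySem.List.min? (h :: t) (fun x => x) = some m := by
      cases hmm : PySem.List.min? (h :: t) (fun x => x) with
      | none => exact absurd ((PySem.List.min?_eq_none_iff _ _).mp hmm) (by simp)
      | some m => exact ⟨m, rfl⟩
    obtain ⟨M, hM⟩ : ∃ M, PySem.List.max? (h :: t) (fun x => x) = some M := by
      cases hmm : PySem.List.max? (h :: t) (fun x => x) with
      | none => exact absurd ((PySem.List.max?_eq_none_iff _ _).mp hmm) (by simp)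
      | some M => exact ⟨M, rfl⟩
    have hmv : m = h := hall' m (PySem.List.min?_mem hm)
    have hMv : M = h := hall' M (PySem.List.max?_mem hM)
    rw [hmv] at hm; rw [hMv] at hM
    have hidx : PySem.List.index? (h :: t) h = some 0 := PySem.List.index?_cons_self h t
    have hA : remove_multiples_of_three_std (h :: t) = h :: h :: t := by
      unfold remove_multiples_of_three_std
      simp only [hm, hM, hidx, Option.bind_some, Option.getD_some, gt_iff_lt,
        lt_self_iff_false, if_false]
      rw [show (((0 : Nat) : Int) + 1) = (((1 : Nat)) : Int) by norm_num]
      rw [PySem.List.slice_to_natCast, PySem.List.slice_natCast, PySem.List.slice_from_natCast]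
      simp
    have hB : remove_multiples_of_three_std_alt (h :: t) = h :: t := by
      unfold remove_multiples_of_three_std_alt
      simp only [hm, hM, Option.getD_some]
      rw [List.foldl_cons]
      have hstep : pvStepB h h ([], 0, none) h = ([h], 2, none) := by simp [pvStepB]
      rw [hstep, pvStepB_s2]
      simp
    rw [hA, hB]
    intro hEq
    have := congrArg List.length hEq
    simp at this

-- ===== VERDICT (by name: the statement is the Claim_ definition above) =====
theorem remove_multiples_of_three_std_changed : Claim_changed_remove_multiples_of_three_std := by
  unfold Claim_changed_remove_multiples_of_three_std; decide
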